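-- pv_equiv track=rewrite | github.com/franciscastro/research-plan-composition | Code/Problem Set/Program Solutions 1/lengthoftriples.py | maxTripleLength
-- ===== SOURCE A (Python) =====
-- def maxTripleLength( list_of_strings ) :
--
-- 	# Initialize helper variables
-- 	longest_concatenation = 0
-- 	count = 0
--
-- 	# Loop through the list of strings
-- 	while ( ( count+2 ) < len( list_of_strings ) ) :
--
-- 		# Compute the length of consecutive elements
-- 		length = len( list_of_strings[count] ) + len( list_of_strings[count+1] ) + len( list_of_strings[count+2] )
--
-- 		# If computed length is greater than the current longest concatenated length
-- 		if ( length > longest_concatenation ) :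
-- 			longest_concatenation = length
--
-- 		# Update count to move to next set of three strings
-- 		count += 1
--
-- 	return longest_concatenation
-- ===== SOURCE B (Python) =====
-- def maxTripleLength(list_of_strings):
--     # prefix[k] = total length of the first k strings
--     prefix = [0]
--     for s in list_of_strings:
--         prefix.append(prefix[-1] + len(s))
--     best = 0
--     for i in range(len(prefix) - 3):
--         best = max(best, prefix[i + 3] - prefix[i])
--     return best
-- ===== Notes on version B (the rewrite author's own statement) =====
-- stated objective: alternative
-- what changed: Replaces the while-loop that re-sums each 3-window of string lengths with a prefix-sum array scanned once, taking the max of prefix[i+3]-prefix[i].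
import Mathlib
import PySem

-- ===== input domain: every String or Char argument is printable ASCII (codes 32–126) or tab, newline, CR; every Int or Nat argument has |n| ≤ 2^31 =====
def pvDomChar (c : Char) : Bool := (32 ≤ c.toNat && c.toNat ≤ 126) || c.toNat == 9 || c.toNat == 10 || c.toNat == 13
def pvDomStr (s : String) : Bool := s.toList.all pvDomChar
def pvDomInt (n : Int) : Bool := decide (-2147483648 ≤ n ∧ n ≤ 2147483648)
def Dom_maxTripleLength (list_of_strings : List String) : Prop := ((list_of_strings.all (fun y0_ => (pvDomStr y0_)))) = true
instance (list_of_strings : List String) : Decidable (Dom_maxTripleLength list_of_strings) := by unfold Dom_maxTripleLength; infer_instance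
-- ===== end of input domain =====

-- B replaces A's while-loop summing each 3-window with a prefix-sum array scanned once (alternative decomposition, same cost).


-- ===== PORT A =====
-- while (count+2) < len(l): iterate count = 0,1,…  ⇒ fold over range(0, len-2)
def maxTripleLength (list_of_strings : List String) : Int :=
  (PySem.List.pyRange 0 ((PySem.List.len list_of_strings) - 2) 1).foldl
    (fun longest_concatenation count =>
      let length := PySem.Str.len (PySem.List.pyGetD list_of_strings count "")
        + PySem.Str.len (PySem.List.pyGetD list_of_strings (count + 1) "")
        + PySem.Str.len (PySem.List.pyGetD list_of_strings (count + 2) "")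
      if length > longest_concatenation then length else longest_concatenation)
    0

-- ===== PORT B =====
-- prefix = [0]; for s in l: prefix.append(prefix[-1] + len(s))
def pvPrefix (list_of_strings : List String) : List Int :=
  list_of_strings.foldl
    (fun pre s => pre ++ [PySem.List.pyGetD pre (-1) 0 + PySem.Str.len s])
    [0]

def maxTripleLength_alt (list_of_strings : List String) : Int :=
  let pre := pvPrefix list_of_strings
  (PySem.List.pyRange 0 ((PySem.List.len pre) - 3) 1).foldl
    (fun best i => max best (PySem.List.pyGetD pre (i + 3) 0 - PySem.List.pyGetD pre i 0))
    0

-- ===== PRECONDITION & SPEC =====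
def Spec_maxTripleLength (list_of_strings : List String) (out : Int) : Prop := out = maxTripleLength_alt list_of_strings
instance (list_of_strings : List String) (out : Int) : Decidable (Spec_maxTripleLength list_of_strings out) := by unfold Spec_maxTripleLength; infer_instance

-- ===== CLAIM (what is proved, stated in full; the proofs are below) =====
def Claim_equal_maxTripleLength : Prop := ∀ (list_of_strings : List String), Dom_maxTripleLength list_of_strings → Spec_maxTripleLength list_of_strings (maxTripleLength list_of_strings)

-- ===== LEMMAS AND PROOFS =====

-- reference prefix-scan: scanLens a l = [a, a+len l0, a+len l0+len l1, …]
def scanLens : Int → List String → List Int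
  | a, [] => [a]
  | a, s :: t => a :: scanLens (a + PySem.Str.len s) t

theorem scanLens_length (a : Int) (l : List String) : (scanLens a l).length = l.length + 1 := by
  induction l generalizing a with
  | nil => rfl
  | cons s t ih => simp [scanLens, ih]

theorem pvPrefix_foldl (l : List String) : ∀ (init : List Int) (a : Int),
    l.foldl (fun pre s => pre ++ [PySem.List.pyGetD pre (-1) 0 + PySem.Str.len s]) (init ++ [a])
      = init ++ scanLens a l := by
  induction l with
  | nil => intro init a; simp [scanLens]
  | cons s t ih =>
    intro init a
    simp only [List.foldl_cons, PySem.List.pyGetD_neg_one_append_singleton]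
    have := ih (init ++ [a]) (a + PySem.Str.len s)
    simpa [scanLens] using this

theorem pvPrefix_eq (l : List String) : pvPrefix l = scanLens 0 l := by
  have := pvPrefix_foldl l [] 0
  simpa [pvPrefix] using this

theorem scanLens_window (l : List String) (a : Int) (k : Nat) (h : k + 3 ≤ l.length) :
    (scanLens a l).getD (k + 3) 0 - (scanLens a l).getD k 0 =
      PySem.Str.len (l.getD k "") + PySem.Str.len (l.getD (k + 1) "")
        + PySem.Str.len (l.getD (k + 2) "") := by
  induction k generalizing l a with
  | zero =>
    match l, h with
    | s1 :: s2 :: s3 :: t, _ =>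
      cases t <;> (simp [scanLens]; ring)
  | succ k ih =>
    match l, h with
    | s :: t, h =>
      have ht : k + 3 ≤ t.length := by simpa using Nat.lt_of_succ_le (by simpa using h)
      simpa [scanLens] using ih t (a + PySem.Str.len s) ht

theorem max_eq_if (b v : Int) : (if v > b then v else b) = max b v := by
  rw [max_def]; split_ifs <;> omega

-- ===== VERDICT (by name: the statement is the Claim_ definition above) =====
theorem maxTripleLength_spec : Claim_equal_maxTripleLength := by
  intro l _
  show maxTripleLength l = maxTripleLength_alt l
  unfold maxTripleLength maxTripleLength_alt
  simp only [pvPrefix_eq, PySem.List.len_eq, scanLens_length]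
  have hb : ((l.length + 1 : Nat) : Int) - 3 = (l.length : Int) - 2 := by push_cast; ring
  rw [hb]
  apply PySem.List.foldl_congr_mem
  intro acc i hi
  rw [PySem.List.mem_pyRange_one] at hi
  obtain ⟨h0, h1⟩ := hi
  lift i to Nat using h0 with k
  have hk : k + 3 ≤ l.length := by omega
  have e1 : (k : Int) + 1 = ((k + 1 : Nat) : Int) := by push_cast; ring
  have e2 : (k : Int) + 2 = ((k + 2 : Nat) : Int) := by push_cast; ring
  have e3 : (k : Int) + 3 = ((k + 3 : Nat) : Int) := by push_cast; ring
  simp only [e1, e2, e3, PySem.List.pyGetD_natCast]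
  rw [scanLens_window l 0 k hk, max_eq_if]
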